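-- pv_equiv track=rewrite | github.com/access-ci-org/Operations_Warehouse_Django | Operations_Warehouse_Django/test_json_sample.py | resource_ids_sorted_by
-- ===== SOURCE A (Python) =====
-- def resource_ids_sorted_by( key, resources ):
--     ''' return list of resource_ids sorted by "key" '''
--     id_list = []
--     key2id = {}
--     for id in resources.keys():
--         match_key = resources[id][key]
--         if match_key in key2id:
--             key2id[ match_key ].append( id )
--         else:
--             key2id[ match_key ] = [ id ]
--     for key in sorted( key2id.keys() ):
--         id_list.extend( key2id[ key ] )
--     return id_list
-- ===== SOURCE B (Python) =====
-- def resource_ids_sorted_by( key, resources ):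
--     ''' return list of resource_ids sorted by "key" '''
--     return sorted( resources.keys(), key=lambda id: resources[id][key] )
-- ===== Notes on version B (the rewrite author's own statement) =====
-- stated objective: idiomatic
-- what changed: Replaces the group-into-a-dict-then-emit-buckets-in-sorted-key-order loop by a single stable sorted() of the ids keyed by their attribute value; stability reproduces A's within-bucket insertion order.
import Mathlib
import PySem

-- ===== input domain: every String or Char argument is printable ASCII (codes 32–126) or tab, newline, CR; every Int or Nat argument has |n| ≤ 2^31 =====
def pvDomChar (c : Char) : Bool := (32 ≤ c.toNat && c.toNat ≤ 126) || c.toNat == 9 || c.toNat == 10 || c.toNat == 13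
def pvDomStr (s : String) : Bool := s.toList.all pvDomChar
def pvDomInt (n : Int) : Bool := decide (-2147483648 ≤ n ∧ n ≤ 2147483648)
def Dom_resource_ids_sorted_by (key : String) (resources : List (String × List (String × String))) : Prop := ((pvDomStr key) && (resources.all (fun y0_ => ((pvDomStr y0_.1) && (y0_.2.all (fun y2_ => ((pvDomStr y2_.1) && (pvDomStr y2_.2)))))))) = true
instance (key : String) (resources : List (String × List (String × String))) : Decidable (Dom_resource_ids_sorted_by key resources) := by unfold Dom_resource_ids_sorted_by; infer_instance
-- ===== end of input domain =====

-- B replaces A's group-by-value dict + emit-buckets-in-sorted-key-order loop by one stable sorted() of the ids keyed by their value (idiomatic; same cost).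

-- ===== PORT A =====
-- resources[id][key] raises KeyError when key is absent; Pre_ excludes that, so the
-- getD "" default below is never the returned content on admitted inputs.
def resource_ids_sorted_by (key : String) (resources : List (String × List (String × String))) : List String :=
  let d := PySem.Dict.ofList resources
  let key2id := d.keys.foldl (fun (k2 : PySem.Dict String (List String)) id =>
      let match_key := (PySem.Dict.ofList (d.getD id [])).getD key ""
      if k2.contains match_key then k2.modify match_key [] (fun l => l ++ [id])
      else k2.insert match_key [id]) PySem.Dict.empty
  (PySem.List.sorted key2id.keys (fun k => k) false).foldl
    (fun id_list k => id_list ++ key2id.getD k []) []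

-- ===== PORT B =====
def resource_ids_sorted_by_alt (key : String) (resources : List (String × List (String × String))) : List String :=
  let d := PySem.Dict.ofList resources
  PySem.List.sorted d.keys (fun id => (PySem.Dict.ofList (d.getD id [])).getD key "") false

-- ===== PRECONDITION & SPEC =====
-- Pre_ excludes exactly the inputs where Python raises KeyError: some resource (the one a
-- duplicate id finally denotes, i.e. a value of the dict) lacks the sort key.
def Pre_resource_ids_sorted_by (key : String) (resources : List (String × List (String × String))) : Prop :=
  ∀ p ∈ (PySem.Dict.ofList resources).items, (PySem.Dict.ofList p.2).contains key = true
instance (key : String) (resources : List (String × List (String × String))) : Decidable (Pre_resource_ids_sorted_by key resources) := by unfold Pre_resource_ids_sorted_by; infer_instance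
def pvWitness_resource_ids_sorted_by : String × (List (String × List (String × String))) :=
  ("k", [("r2", [("k", "b")]), ("r1", [("k", "a")]), ("r3", [("k", "b")])])

def Spec_resource_ids_sorted_by (key : String) (resources : List (String × List (String × String))) (out : List String) : Prop := out = resource_ids_sorted_by_alt key resources
instance (key : String) (resources : List (String × List (String × String))) (out : List String) : Decidable (Spec_resource_ids_sorted_by key resources out) := by unfold Spec_resource_ids_sorted_by; infer_instance

-- ===== CLAIM (what is proved, stated in full; the proofs are below) =====
def Claim_equal_resource_ids_sorted_by : Prop := ∀ (key : String) (resources : List (String × List (String × String))), Dom_resource_ids_sorted_by key resources → Pre_resource_ids_sorted_by key resources → Spec_resource_ids_sorted_by key resources (resource_ids_sorted_by key resources)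

-- ===== LEMMAS AND PROOFS =====

-- x goes to the very front when it sorts before everything present
theorem insertBy_of_forall_before {α : Type} (before : α → α → Bool) (x : α) (bs : List α)
    (h : ∀ b ∈ bs, before x b = true) : PySem.List.insertBy before x bs = x :: bs := by
  cases bs with
  | nil => rfl
  | cons b bs => simp [PySem.List.insertBy, h b (by simp)]

-- insertBy skips a prefix it does not sort before
theorem insertBy_append_left {α : Type} (before : α → α → Bool) (x : α) (as bs : List α)
    (h : ∀ a ∈ as, before x a = false) :
    PySem.List.insertBy before x (as ++ bs) = as ++ PySem.List.insertBy before x bs := by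
  induction as with
  | nil => rfl
  | cons a as ih =>
      simp only [List.cons_append, PySem.List.insertBy, h a (by simp)]
      simp only [Bool.false_eq_true, if_false, List.cons.injEq, true_and]
      exact ih (fun a ha => h a (by simp [ha]))

theorem insertBy_perm {α : Type} (before : α → α → Bool) (x : α) (ys : List α) :
    (PySem.List.insertBy before x ys).Perm (x :: ys) := by
  induction ys with
  | nil => rfl
  | cons y ys ih =>
      by_cases h : before x y = true
      · simp [PySem.List.insertBy, h]
      · simp only [PySem.List.insertBy, h]
        exact (ih.cons y).trans (List.Perm.swap x y ys)

theorem insertBy_pairwise_lt (x : String) (vs : List String)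
    (hp : vs.Pairwise (· < ·)) (hx : x ∉ vs) :
    (PySem.List.insertBy (fun a b => decide (a < b)) x vs).Pairwise (· < ·) := by
  induction vs with
  | nil => simp [PySem.List.insertBy]
  | cons v vt ih =>
      rcases List.pairwise_cons.mp hp with ⟨hv, hvt⟩
      by_cases h : x < v
      · simp only [PySem.List.insertBy, decide_eq_true_eq, h, if_pos]
        exact List.pairwise_cons.mpr ⟨by
          intro b hb
          rcases List.mem_cons.mp hb with rfl | hb
          · exact h
          · exact lt_trans h (hv b hb), hp⟩
      · have hvx : v < x := lt_of_le_of_ne (not_lt.mp h) (fun e => hx (e ▸ List.mem_cons_self))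
        simp only [PySem.List.insertBy, decide_eq_true_eq, h, if_false]
        refine List.pairwise_cons.mpr ⟨?_, ih hvt (fun m => hx (List.mem_cons_of_mem v m))⟩
        intro b hb
        rcases (PySem.List.mem_insertBy _ x b vt).mp hb with rfl | hb
        · exact hvx
        · exact hv b hb

-- A's bucket concatenation, as a function of the sorted distinct values vs
def pvBuckets (f : String → String) (vs xs : List String) : List String :=
  vs.flatMap (fun v => xs.filter (fun y => f y == v))

theorem mem_pvBuckets_key {f : String → String} {vs xs : List String} {b : String}
    (hb : b ∈ pvBuckets f vs xs) : f b ∈ vs := by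
  simp only [pvBuckets, List.mem_flatMap, List.mem_filter, beq_iff_eq] at hb
  rcases hb with ⟨v, hv, _, he⟩
  exact he ▸ hv

theorem pvBuckets_cons (f : String → String) (v : String) (vt xs : List String) :
    pvBuckets f (v :: vt) xs = xs.filter (fun y => f y == v) ++ pvBuckets f vt xs := by
  simp [pvBuckets]

-- appending an id whose value names no bucket of vs leaves every bucket unchanged
theorem pvBuckets_append_of_not_mem (f : String → String) (x : String) (vs xs : List String)
    (h : f x ∉ vs) : pvBuckets f vs (xs ++ [x]) = pvBuckets f vs xs := by
  unfold pvBuckets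
  apply List.flatMap_congr
  intro w hw
  have : (f x == w) = false := by
    simp only [beq_eq_false_iff_ne, ne_eq]; intro e; exact h (e ▸ hw)
  simp [List.filter_append, this]

-- inserting an id whose value is already a bucket appends it to that bucket
theorem insertBy_pvBuckets_mem (f : String → String) (x : String) :
    ∀ (vs xs : List String), vs.Pairwise (· < ·) → f x ∈ vs →
    PySem.List.insertBy (fun a b => decide (f a < f b)) x (pvBuckets f vs xs)
      = pvBuckets f vs (xs ++ [x]) := by
  intro vs
  induction vs with
  | nil => intro xs _ hm; simp at hm
  | cons v vt ih =>
      intro xs hp hm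
      rcases List.pairwise_cons.mp hp with ⟨hv, hvt⟩
      rw [pvBuckets_cons, pvBuckets_cons]
      by_cases he : f x = v
      · -- x belongs to the first bucket: skip it, then land before all later buckets
        rw [insertBy_append_left _ _ _ _ (by
          intro a ha
          have : f a = v := by simpa using (List.mem_filter.mp ha).2
          simp [this, he])]
        rw [insertBy_of_forall_before _ _ _ (by
          intro b hb
          have : v < f b := hv _ (mem_pvBuckets_key (f := f) (vs := vt) (xs := xs) hb)
          simp [he, this])]
        have h1 : (xs ++ [x]).filter (fun y => f y == v) = xs.filter (fun y => f y == v) ++ [x] := by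
          have : (f x == v) = true := by simp [he]
          simp [List.filter_append, this]
        have h2 : pvBuckets f vt (xs ++ [x]) = pvBuckets f vt xs :=
          pvBuckets_append_of_not_mem f x vt xs (by
            intro hw
            exact absurd (he ▸ hv _ hw) (lt_irrefl v))
        rw [h1, h2]
        simp
      · -- x's value lies further right: skip the whole first bucket
        have hm' : f x ∈ vt := by
          rcases List.mem_cons.mp hm with e | h
          · exact absurd e he
          · exact h
        have hvfx : v < f x := hv _ hm'
        rw [insertBy_append_left _ _ _ _ (by
          intro a ha
          have : f a = v := by simpa using (List.mem_filter.mp ha).2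
          simp only [this, decide_eq_false_iff_not, not_lt]
          exact le_of_lt hvfx)]
        rw [ih xs hvt hm']
        have : (xs ++ [x]).filter (fun y => f y == v) = xs.filter (fun y => f y == v) := by
          have : (f x == v) = false := by simp [he]
          simp [List.filter_append, this]
        rw [this]

-- inserting an id with a fresh value creates a new singleton bucket in sorted position
theorem insertBy_pvBuckets_fresh (f : String → String) (x : String) :
    ∀ (vs xs : List String), vs.Pairwise (· < ·) → f x ∉ vs →
    xs.filter (fun y => f y == f x) = [] →
    PySem.List.insertBy (fun a b => decide (f a < f b)) x (pvBuckets f vs xs)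
      = pvBuckets f (PySem.List.insertBy (fun a b => decide (a < b)) (f x) vs) (xs ++ [x]) := by
  intro vs
  induction vs with
  | nil =>
      intro xs _ _ hfil
      show PySem.List.insertBy _ x (pvBuckets f [] xs) = pvBuckets f [f x] (xs ++ [x])
      rw [pvBuckets_cons]
      simp [pvBuckets, PySem.List.insertBy, List.filter_append, hfil]
  | cons v vt ih =>
      intro xs hp hm hfil
      rcases List.pairwise_cons.mp hp with ⟨hv, hvt⟩
      have hne : f x ≠ v := fun e => hm (e ▸ List.mem_cons_self)
      by_cases h : f x < v
      · -- new bucket goes first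
        rw [insertBy_of_forall_before _ _ _ (by
          intro b hb
          have hk : f b ∈ v :: vt := mem_pvBuckets_key (f := f) hb
          have : v ≤ f b := by
            rcases List.mem_cons.mp hk with e | hk'
            · exact le_of_eq e.symm
            · exact le_of_lt (hv _ hk')
          simp only [decide_eq_true_eq]
          exact lt_of_lt_of_le h this)]
        have hins : PySem.List.insertBy (fun a b => decide (a < b)) (f x) (v :: vt) = f x :: v :: vt := by
          simp [PySem.List.insertBy, h]
        have h1 : (xs ++ [x]).filter (fun y => f y == f x) = [x] := by
          simp [List.filter_append, hfil]
        rw [hins, pvBuckets_cons f (f x) (v :: vt) (xs ++ [x]),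
          pvBuckets_append_of_not_mem f x (v :: vt) xs hm, h1]
        simp
      · have hvfx : v < f x := lt_of_le_of_ne (not_lt.mp h) (Ne.symm hne)
        have hins : PySem.List.insertBy (fun a b => decide (a < b)) (f x) (v :: vt)
            = v :: PySem.List.insertBy (fun a b => decide (a < b)) (f x) vt := by
          simp [PySem.List.insertBy, h]
        rw [pvBuckets_cons, hins, pvBuckets_cons]
        rw [insertBy_append_left _ _ _ _ (by
          intro a ha
          have : f a = v := by simpa using (List.mem_filter.mp ha).2
          simp only [this, decide_eq_false_iff_not, not_lt]
          exact le_of_lt hvfx)]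
        rw [ih xs hvt (fun m => hm (List.mem_cons_of_mem v m)) hfil]
        have : (xs ++ [x]).filter (fun y => f y == v) = xs.filter (fun y => f y == v) := by
          have : (f x == v) = false := by simp [hne]
          simp [List.filter_append, this]
        rw [this]

-- appending one element to the ordered-distinct set: absorbed or appended
theorem pvSet_append_mem (f : String → String) (xs : List String) (x : String)
    (hm : f x ∈ xs.map f) :
    PySem.Set.ofList ((xs ++ [x]).map f) = PySem.Set.ofList (xs.map f) := by
  have h0 : PySem.Set.ofList ((xs ++ [x]).map f) = (PySem.Set.ofList (xs.map f)).add (f x) := by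
    rw [List.map_append]; simp [PySem.Set.ofList, List.foldl_append]
  have h2 : f x ∈ PySem.Set.ofList (xs.map f) := (PySem.Set.mem_ofList _ _).mpr hm
  have hc : (PySem.Set.ofList (xs.map f)).contains (f x) = true := by
    simpa [List.contains_eq_mem] using h2
  rw [h0, PySem.Set.add, hc]; simp

theorem pvSet_append_fresh (f : String → String) (xs : List String) (x : String)
    (hm : f x ∉ xs.map f) :
    PySem.Set.ofList ((xs ++ [x]).map f) = PySem.Set.ofList (xs.map f) ++ [f x] := by
  have h0 : PySem.Set.ofList ((xs ++ [x]).map f) = (PySem.Set.ofList (xs.map f)).add (f x) := by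
    rw [List.map_append]; simp [PySem.Set.ofList, List.foldl_append]
  have h2 : f x ∉ PySem.Set.ofList (xs.map f) := fun h => hm ((PySem.Set.mem_ofList _ _).mp h)
  have hc : (PySem.Set.ofList (xs.map f)).contains (f x) = false := by
    simpa [List.contains_eq_mem] using h2
  rw [h0, PySem.Set.add, hc]; simp

-- THE stable-sort/bucket identity: sorting ids by f equals concatenating, over the
-- sorted distinct f-values, the ids having that value (in original order).
theorem sorted_eq_pvBuckets (f : String → String) :
    ∀ (xs : List String),
    PySem.List.sorted xs f false
      = pvBuckets f (PySem.List.sorted (PySem.Set.ofList (xs.map f)) (fun v => v) false) xs := by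
  intro xs
  induction xs using List.reverseRecOn with
  | nil => rfl
  | append_singleton xs x ih =>
      have hsplit : PySem.List.sorted (xs ++ [x]) f false
          = PySem.List.insertBy (fun a b => decide (f a < f b)) x (PySem.List.sorted xs f false) := by
        rw [PySem.List.sorted_eq_foldl_insertBy, PySem.List.sorted_eq_foldl_insertBy, List.foldl_append]
        rfl
      set vs := PySem.List.sorted (PySem.Set.ofList (xs.map f)) (fun v => v) false with hvs
      have hpvs : vs.Pairwise (· < ·) := PySem.List.sorted_ofList_pairwise_lt _
      by_cases hm : f x ∈ xs.map f
      · have hset : PySem.Set.ofList ((xs ++ [x]).map f) = PySem.Set.ofList (xs.map f) :=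
          pvSet_append_mem f xs x hm
        rw [hsplit, ih, hset, ← hvs]
        exact insertBy_pvBuckets_mem f x vs xs hpvs
          (by rw [hvs, PySem.List.mem_sorted]; exact (PySem.Set.mem_ofList _ _).mpr hm)
      · have hfx_vs : f x ∉ vs := by
          rw [hvs, PySem.List.mem_sorted]
          intro h; exact hm ((PySem.Set.mem_ofList _ _).mp h)
        have hsort' : PySem.List.sorted (PySem.Set.ofList ((xs ++ [x]).map f)) (fun v => v) false
            = PySem.List.insertBy (fun a b => decide (a < b)) (f x) vs := by
          apply PySem.List.sorted_eq_of_perm_of_pairwise_lt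
          · -- perm: insertBy (f x) vs ~ f x :: vs ~ f x :: ofList ~ ofList (l ++ [f x])
            have h1 : PySem.Set.ofList ((xs ++ [x]).map f) = PySem.Set.ofList (xs.map f) ++ [f x] :=
              pvSet_append_fresh f xs x hm
            rw [h1]
            have p1 : (PySem.List.insertBy (fun a b => decide (a < b)) (f x) vs).Perm (f x :: vs) :=
              insertBy_perm _ _ _
            have p2 : (f x :: vs).Perm (f x :: PySem.Set.ofList (xs.map f)) :=
              (PySem.List.sorted_perm _ _ _).cons _
            have p3 : (f x :: PySem.Set.ofList (xs.map f)).Perm (PySem.Set.ofList (xs.map f) ++ [f x]) :=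
              (List.perm_append_singleton (f x) (PySem.Set.ofList (xs.map f))).symm
            exact (p1.trans p2).trans p3
          · exact insertBy_pairwise_lt (f x) vs hpvs hfx_vs
        rw [hsplit, ih, hsort']
        exact insertBy_pvBuckets_fresh f x vs xs hpvs hfx_vs
          (List.filter_eq_nil_iff.mpr (by
            intro y hy h
            exact hm (eq_of_beq h ▸ List.mem_map_of_mem hy)))

-- A's whole pipeline (group by f into a dict, then emit buckets over the sorted keys),
-- for an arbitrary id list and key function
theorem pvA_pipeline (f : String → String) (ids : List String) :
    (let key2id := ids.foldl (fun (k2 : PySem.Dict String (List String)) id =>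
        let match_key := f id
        if k2.contains match_key then k2.modify match_key [] (fun l => l ++ [id])
        else k2.insert match_key [id]) PySem.Dict.empty
     (PySem.List.sorted key2id.keys (fun k => k) false).foldl
       (fun id_list k => id_list ++ key2id.getD k []) [])
    = PySem.List.sorted ids f false := by
  -- the grouping loop is a modify-fold
  have hfold : ids.foldl (fun (k2 : PySem.Dict String (List String)) id =>
      let match_key := f id
      if k2.contains match_key then k2.modify match_key [] (fun l => l ++ [id])
      else k2.insert match_key [id]) PySem.Dict.empty
      = ids.foldl (fun (k2 : PySem.Dict String (List String)) id =>
          k2.modify (f id) [] (fun l => l ++ [id])) PySem.Dict.empty := by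
    apply PySem.List.foldl_congr_mem
    intro k2 id _
    by_cases h : k2.contains (f id) = true
    · simp [h]
    · have hg : k2.getD (f id) [] = [] :=
        PySem.Dict.getD_of_not_contains k2 [] (by simpa using h)
      simp [h, PySem.Dict.modify, hg]
  show (PySem.List.sorted _ (fun k => k) false).foldl _ [] = _
  rw [hfold]
  set key2id := ids.foldl (fun (k2 : PySem.Dict String (List String)) id =>
      k2.modify (f id) [] (fun l => l ++ [id])) PySem.Dict.empty with hk2
  -- its keys are the distinct f-values, in first-seen order
  have hkeys : key2id.keys = PySem.Set.ofList (ids.map f) := by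
    rw [hk2, PySem.Dict.keys_foldl_modify_key ids f [] (fun _ id l => l ++ [id]) PySem.Dict.empty]
    simp [PySem.Set.update, PySem.Set.ofList, PySem.Dict.empty, PySem.Set.empty]
  -- its bucket for c holds exactly the ids whose value is c, in order
  have hgetD : ∀ c, key2id.getD c [] = ids.filter (fun y => f y == c) := by
    intro c
    have hmap : ids.foldl (fun (k2 : PySem.Dict String (List String)) id =>
        k2.modify (f id) [] (fun l => l ++ [id])) PySem.Dict.empty
        = (ids.map (fun id => (f id, id))).foldl
            (fun k2 p => k2.modify p.1 [] (fun l => l ++ [p.2])) PySem.Dict.empty := by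
      rw [List.foldl_map]
    rw [hk2, hmap, PySem.Dict.getD_foldl_modify_append]
    simp [List.filter_map, Function.comp_def]
  rw [PySem.List.foldl_append_eq_flatMap]
  have hflat : (PySem.List.sorted key2id.keys (fun k => k) false).flatMap (fun k => key2id.getD k [])
      = pvBuckets f (PySem.List.sorted (PySem.Set.ofList (ids.map f)) (fun v => v) false) ids := by
    rw [hkeys, pvBuckets]
    exact List.flatMap_congr (fun k _ => hgetD k)
  rw [List.nil_append, hflat, ← sorted_eq_pvBuckets f ids]

-- ===== VERDICT (by name: the statement is the Claim_ definition above) =====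
theorem resource_ids_sorted_by_spec : Claim_equal_resource_ids_sorted_by := by
  intro key resources _ _
  unfold Spec_resource_ids_sorted_by resource_ids_sorted_by resource_ids_sorted_by_alt
  exact pvA_pipeline
    (fun id => (PySem.Dict.ofList ((PySem.Dict.ofList resources).getD id [])).getD key "")
    (PySem.Dict.ofList resources).keys
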